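-- pv_equiv track=rewrite | github.com/andythenorth/iron-horse | bin/refactor_wagon_classes/find_consist_classes.py | find_subclasses
-- ===== SOURCE A (Python) =====
-- def find_subclasses(root_class, inheritance_tree):
--     """Recursively finds all subclasses of a given root class."""
--     discovered = set()
--
--     def recurse(class_name):
--         if class_name not in discovered:
--             discovered.add(class_name)
--             for child in inheritance_tree.get(class_name, []):
--                 recurse(child)
--
--     recurse(root_class)
--     discovered.discard(root_class)  # Exclude the root class itself
--     return discovered
-- ===== SOURCE B (Python) =====
-- def find_subclasses(root_class, inheritance_tree):
--     """Head-first worklist traversal recording discovery order in a list; set built once at the end."""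
--     order = []
--     stack = [root_class]
--     while stack:
--         node, rest = stack[0], stack[1:]
--         if node in order:
--             stack = rest
--         else:
--             order.append(node)
--             stack = inheritance_tree.get(node, []) + rest
--     result = set(order)
--     result.discard(root_class)
--     return result
-- ===== Notes on version B (the rewrite author's own statement) =====
-- stated objective: alternative
-- what changed: Replaces A's recursive mutate-a-set DFS helper by an iterative head-first worklist loop that accumulates the discovery order in a plain list and builds the result set only once at the end.
import Mathlib
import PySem

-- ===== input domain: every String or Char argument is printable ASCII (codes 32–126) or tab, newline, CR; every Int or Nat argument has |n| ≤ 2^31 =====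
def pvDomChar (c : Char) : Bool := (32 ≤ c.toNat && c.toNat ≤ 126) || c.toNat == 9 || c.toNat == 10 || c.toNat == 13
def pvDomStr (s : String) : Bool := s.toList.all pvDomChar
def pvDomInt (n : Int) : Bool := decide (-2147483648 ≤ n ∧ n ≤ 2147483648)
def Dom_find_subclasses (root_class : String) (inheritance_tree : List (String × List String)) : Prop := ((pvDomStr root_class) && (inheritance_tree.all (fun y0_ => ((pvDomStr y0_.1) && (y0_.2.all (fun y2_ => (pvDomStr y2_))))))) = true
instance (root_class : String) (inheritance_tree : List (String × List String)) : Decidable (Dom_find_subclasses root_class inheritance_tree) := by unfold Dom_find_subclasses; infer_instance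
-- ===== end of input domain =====

-- B replaces A's recursive set-mutating helper by an iterative head-first worklist loop that records the discovery order in a plain list and builds the set once at the end (same values; not claimed faster).

-- ===== PORT A =====
-- total number of child references in the tree; used only to size the fuel that makes the (in Python unbounded) recursion structural
def pvNumRefs (inheritance_tree : List (String × List String)) : Nat :=
  (inheritance_tree.flatMap (fun kv => kv.2)).length

-- the inner 'def recurse(class_name)'; fuel pvNumRefs+2 never runs out (recursion depth ≤ distinct reachable nodes + 1, proved via pv_ins below)
def pvRecurseA (t : List (String × List String)) : Nat → PySem.Set String → String → PySem.Set String
  | 0, d, _ => d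
  | f + 1, discovered, class_name =>
    if PySem.Set.contains discovered class_name then discovered
    else ((PySem.Dict.mk t).getD class_name []).foldl (pvRecurseA t f) (PySem.Set.add discovered class_name)

def find_subclasses (root_class : String) (inheritance_tree : List (String × List String)) : List String :=
  let discovered :=
    pvRecurseA inheritance_tree (pvNumRefs inheritance_tree + 2) PySem.Set.empty root_class
  PySem.Set.discard discovered root_class

-- ===== PORT B =====
-- the 'while stack:' loop of Source B: node, rest = stack[0], stack[1:]; skip if already in order,
-- else append node to order and prepend its children; fuel (pvNumRefs+2)^2 never runs out (proved via pv_dfs_foldl below)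
def pvWorklist (t : List (String × List String)) : Nat → List String → List String → List String
  | 0, _, order => order
  | f + 1, stack, order =>
    match stack with
    | [] => order
    | node :: rest =>
      if order.contains node then pvWorklist t f rest order
      else pvWorklist t f (((PySem.Dict.mk t).getD node []) ++ rest) (order ++ [node])

def find_subclasses_alt (root_class : String) (inheritance_tree : List (String × List String)) : List String :=
  let m := pvNumRefs inheritance_tree + 2
  let order := pvWorklist inheritance_tree (m * m) [root_class] []
  PySem.Set.discard (PySem.Set.ofList order) root_class

-- ===== PRECONDITION & SPEC =====
def Spec_find_subclasses (root_class : String) (inheritance_tree : List (String × List String)) (out : List String) : Prop := out = find_subclasses_alt root_class inheritance_tree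
instance (root_class : String) (inheritance_tree : List (String × List String)) (out : List String) : Decidable (Spec_find_subclasses root_class inheritance_tree out) := by unfold Spec_find_subclasses; infer_instance

-- ===== CLAIM (what is proved, stated in full; the proofs are below) =====
def Claim_equal_find_subclasses : Prop := ∀ (root_class : String) (inheritance_tree : List (String × List String)), Dom_find_subclasses root_class inheritance_tree → Spec_find_subclasses root_class inheritance_tree (find_subclasses root_class inheritance_tree)

-- ===== LEMMAS AND PROOFS =====

-- every name that can ever reach the worklist / the recursion: the root plus every child reference
def pvUniv (r : String) (t : List (String × List String)) : List String :=
  r :: t.flatMap (fun kv => kv.2)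

-- the decreasing measure: number of universe elements not yet discovered
def pvCnt (r : String) (t : List (String × List String)) (d : PySem.Set String) : Nat :=
  (PySem.List.dedup (pvUniv r t)).countP (fun x => !(PySem.Set.contains d x))

-- head-first DFS worklist with a Set accumulator: the shape shared by both proofs
def pvDfs (t : List (String × List String)) : Nat → List String → PySem.Set String → PySem.Set String
  | 0, _, d => d
  | _ + 1, [], d => d
  | f + 1, x :: s, d =>
    if PySem.Set.contains d x then pvDfs t f s d
    else pvDfs t f (((PySem.Dict.mk t).getD x []) ++ s) (PySem.Set.add d x)

lemma pv_child_mem (t : List (String × List String)) (x c : String)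
    (h : c ∈ (PySem.Dict.mk t).getD x []) : c ∈ t.flatMap (fun kv => kv.2) := by
  induction t with
  | nil => simp [PySem.Dict.getD_eq_get?_getD, PySem.Dict.get?] at h
  | cons p tl ih =>
    rw [PySem.Dict.getD_eq_get?_getD, PySem.Dict.get?_mk_cons] at h
    rw [List.flatMap_cons, List.mem_append]
    by_cases hk : p.1 == x
    · rw [if_pos hk] at h; exact Or.inl h
    · rw [if_neg hk, ← PySem.Dict.getD_eq_get?_getD] at h
      exact Or.inr (ih h)

lemma pv_child_len (t : List (String × List String)) (x : String) :
    ((PySem.Dict.mk t).getD x []).length ≤ pvNumRefs t := by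
  induction t with
  | nil => simp [PySem.Dict.getD_eq_get?_getD, PySem.Dict.get?, pvNumRefs]
  | cons p tl ih =>
    rw [PySem.Dict.getD_eq_get?_getD, PySem.Dict.get?_mk_cons]
    simp only [pvNumRefs, List.flatMap_cons, List.length_append] at ih ⊢
    by_cases hk : p.1 == x
    · rw [if_pos hk]; simp only [Option.getD_some]; omega
    · rw [if_neg hk, ← PySem.Dict.getD_eq_get?_getD]; omega

lemma pv_foldl_grow {β : Type} (h : PySem.Set String → β → PySem.Set String)
    (hg : ∀ d c, ∃ e, h d c = d ++ e) :
    ∀ (l : List β) (d : PySem.Set String), ∃ e, l.foldl h d = d ++ e := by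
  intro l
  induction l with
  | nil => exact fun d => ⟨[], by simp⟩
  | cons c cs ih =>
    intro d
    obtain ⟨e1, h1⟩ := hg d c
    obtain ⟨e2, h2⟩ := ih (h d c)
    exact ⟨e1 ++ e2, by rw [List.foldl_cons, h2, h1, List.append_assoc]⟩

lemma pv_rec_grow (t : List (String × List String)) :
    ∀ (f : Nat) (d : PySem.Set String) (c : String), ∃ e, pvRecurseA t f d c = d ++ e := by
  intro f
  induction f with
  | zero => exact fun d c => ⟨[], by simp [pvRecurseA]⟩
  | succ f ih =>
    intro d c
    simp only [pvRecurseA]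
    by_cases hc : PySem.Set.contains d c
    · exact ⟨[], by rw [if_pos hc]; simp⟩
    · rw [if_neg hc]
      obtain ⟨e2, h2⟩ := pv_foldl_grow _ ih ((PySem.Dict.mk t).getD c []) (PySem.Set.add d c)
      refine ⟨[c] ++ e2, ?_⟩
      rw [h2, PySem.Set.add_of_not_mem, List.append_assoc]
      exact fun hm => hc (by simpa [PySem.Set.contains_iff] using hm)

lemma pv_cnt_mono (r : String) (t : List (String × List String)) (d d' : PySem.Set String)
    (h : ∀ x, x ∈ d → x ∈ d') : pvCnt r t d' ≤ pvCnt r t d := by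
  unfold pvCnt
  apply List.countP_mono_left
  intro a _ ha
  simp only [Bool.not_eq_true', ← Bool.not_eq_true, PySem.Set.contains_iff] at *
  exact fun hm => ha (h a hm)

lemma pv_countP_lt {α : Type} (l : List α) (p q : α → Bool)
    (hpq : ∀ a, q a = true → p a = true) (x : α) (hx : x ∈ l) (hp : p x = true)
    (hq : q x = false) : l.countP q < l.countP p := by
  induction l with
  | nil => cases hx
  | cons a tl ih =>
    rcases List.mem_cons.1 hx with rfl | hx'
    · have := List.countP_mono_left (l := tl) (p := q) (q := p) (fun a _ => hpq a)
      simp [hp, hq]; omega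
    · have := ih hx'
      simp only [List.countP_cons]
      cases hqa : q a
      · simp; cases hpa : p a <;> simp <;> omega
      · have := hpq a hqa; simp [this]; omega

lemma pv_cnt_lt (r : String) (t : List (String × List String)) (d : PySem.Set String)
    (x : String) (hxU : x ∈ pvUniv r t) (hxd : x ∉ d) :
    pvCnt r t (PySem.Set.add d x) < pvCnt r t d := by
  unfold pvCnt
  apply pv_countP_lt _ _ _ _ x
  · simpa [PySem.List.mem_dedup] using hxU
  · simpa [PySem.Set.contains_iff] using hxd
  · simp [PySem.Set.mem_add]
  · intro a ha
    simp only [Bool.not_eq_true', ← Bool.not_eq_true, PySem.Set.contains_iff] at *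
    exact fun hm => ha ((PySem.Set.mem_add _ _ _).2 (Or.inl hm))

lemma pv_cnt_le (r : String) (t : List (String × List String)) (d : PySem.Set String) :
    pvCnt r t d ≤ pvNumRefs t + 1 := by
  unfold pvCnt
  calc (PySem.List.dedup (pvUniv r t)).countP _
      ≤ (PySem.List.dedup (pvUniv r t)).length := List.countP_le_length
    _ ≤ (pvUniv r t).length := by
        rw [PySem.List.dedup_eq_ofList]; exact PySem.Set.length_ofList_le _
    _ = pvNumRefs t + 1 := by simp [pvUniv, pvNumRefs]

lemma pv_cnt_zero (r : String) (t : List (String × List String)) (d : PySem.Set String)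
    (h : pvCnt r t d = 0) (c : String) (hc : c ∈ pvUniv r t) : PySem.Set.contains d c = true := by
  unfold pvCnt at h
  rw [List.countP_eq_zero] at h
  have := h c (by simpa [PySem.List.mem_dedup] using hc)
  simpa using this

-- fuel insensitivity of the recursive DFS: any fuel above the measure gives the same result
lemma pv_ins (r : String) (t : List (String × List String)) :
    ∀ (n f f' : Nat) (d : PySem.Set String) (c : String), c ∈ pvUniv r t →
      pvCnt r t d ≤ n → n + 1 ≤ f → n + 1 ≤ f' →
      pvRecurseA t f d c = pvRecurseA t f' d c := by
  intro n
  induction n with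
  | zero =>
    intro f f' d c hc hn hf hf'
    obtain ⟨f0, rfl⟩ : ∃ k, f = k + 1 := ⟨f - 1, by omega⟩
    obtain ⟨f1, rfl⟩ : ∃ k, f' = k + 1 := ⟨f' - 1, by omega⟩
    have hcd := pv_cnt_zero r t d (by omega) c hc
    simp only [pvRecurseA]
    rw [if_pos hcd, if_pos hcd]
  | succ m ih =>
    intro f f' d c hc hn hf hf'
    obtain ⟨f0, rfl⟩ : ∃ k, f = k + 1 := ⟨f - 1, by omega⟩
    obtain ⟨f1, rfl⟩ : ∃ k, f' = k + 1 := ⟨f' - 1, by omega⟩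
    simp only [pvRecurseA]
    by_cases hcd : PySem.Set.contains d c
    · rw [if_pos hcd, if_pos hcd]
    · rw [if_neg hcd, if_neg hcd]
      have hlt : pvCnt r t (PySem.Set.add d c) < pvCnt r t d :=
        pv_cnt_lt r t d c hc (fun hm => hcd (by simpa [PySem.Set.contains_iff] using hm))
      have key : ∀ (l : List String), (∀ y ∈ l, y ∈ pvUniv r t) →
          ∀ (v : PySem.Set String), pvCnt r t v ≤ m →
          l.foldl (pvRecurseA t f0) v = l.foldl (pvRecurseA t f1) v := by
        intro l
        induction l with
        | nil => intros; rfl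
        | cons y ys ihl =>
          intro hl v hv
          have h1 : pvRecurseA t f0 v y = pvRecurseA t f1 v y :=
            ih f0 f1 v y (hl y List.mem_cons_self) hv (by omega) (by omega)
          rw [List.foldl_cons, List.foldl_cons, h1]
          apply ihl (fun z hz => hl z (List.mem_cons_of_mem _ hz))
          obtain ⟨e, he⟩ := pv_rec_grow t f1 v y
          have : pvCnt r t (pvRecurseA t f1 v y) ≤ pvCnt r t v :=
            pv_cnt_mono r t v _ (fun z hz => by rw [he]; exact List.mem_append_left _ hz)
          omega
      apply key
      · exact fun y hy => List.mem_cons_of_mem _ (pv_child_mem t c y hy)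
      · omega

-- Source B's list-accumulator loop IS the Set-accumulator DFS: it only appends when the element is fresh
lemma pv_worklist_dfs (t : List (String × List String)) :
    ∀ (f : Nat) (s : List String) (d : List String),
      pvWorklist t f s d = pvDfs t f s d := by
  intro f
  induction f with
  | zero => intros; rfl
  | succ f ih =>
    intro s d
    match s with
    | [] => rfl
    | x :: s' =>
      simp only [pvWorklist, pvDfs]
      by_cases hx : PySem.Set.contains d x = true
      · have hx' : d.contains x = true := hx
        rw [if_pos hx', if_pos hx]
        exact ih s' d
      · have hx' : ¬ d.contains x = true := hx
        rw [if_neg hx', if_neg hx]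
        rw [ih, PySem.Set.add_of_not_mem
          (fun hm => hx (((PySem.Set.contains_iff d x)).2 hm))]

-- the Set-accumulator DFS keeps the accumulator duplicate-free
lemma pv_dfs_nodup (t : List (String × List String)) :
    ∀ (f : Nat) (s : List String) (d : PySem.Set String), d.Nodup → (pvDfs t f s d).Nodup := by
  intro f
  induction f with
  | zero => intro s d hd; exact hd
  | succ f ih =>
    intro s d hd
    match s with
    | [] => exact hd
    | x :: s' =>
      simp only [pvDfs]
      by_cases hx : PySem.Set.contains d x
      · rw [if_pos hx]; exact ih s' d hd
      · rw [if_neg hx]; exact ih _ _ (PySem.Set.nodup_add d x hd)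

-- the head-first DFS computes the fold of the recursive DFS (with any sufficient fuels)
lemma pv_dfs_foldl (r : String) (t : List (String × List String)) :
    ∀ (g : Nat) (s : List String), (∀ y ∈ s, y ∈ pvUniv r t) →
      ∀ (d : PySem.Set String) (F : Nat),
        s.length + pvCnt r t d * (pvNumRefs t + 1) ≤ g → pvCnt r t d + 1 ≤ F →
        pvDfs t g s d = s.foldl (pvRecurseA t F) d := by
  intro g
  induction g with
  | zero =>
    intro s hs d F hg hF
    have hnil : s = [] := List.eq_nil_of_length_eq_zero (by omega)
    subst hnil; rfl
  | succ g ih =>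
    intro s hs d F hg hF
    match s with
    | [] => rfl
    | x :: s' =>
      have hxU : x ∈ pvUniv r t := hs x List.mem_cons_self
      obtain ⟨F0, rfl⟩ : ∃ k, F = k + 1 := ⟨F - 1, by omega⟩
      simp only [pvDfs, List.foldl_cons]
      by_cases hx : PySem.Set.contains d x
      · rw [if_pos hx, show pvRecurseA t (F0 + 1) d x = d from by
          simp only [pvRecurseA]; rw [if_pos hx]]
        exact ih s' (fun y hy => hs y (List.mem_cons_of_mem _ hy)) d (F0 + 1)
          (by simp only [List.length_cons] at hg; omega) hF
      · rw [if_neg hx, show pvRecurseA t (F0 + 1) d x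
            = ((PySem.Dict.mk t).getD x []).foldl (pvRecurseA t F0) (PySem.Set.add d x) from by
          simp only [pvRecurseA]; rw [if_neg hx]]
        have hxd : x ∉ d := fun hm => hx (by simpa [PySem.Set.contains_iff] using hm)
        have hltA := pv_cnt_lt r t d x hxU hxd
        have hclen := pv_child_len t x
        have hlift : ((PySem.Dict.mk t).getD x []).foldl (pvRecurseA t F0) (PySem.Set.add d x)
            = ((PySem.Dict.mk t).getD x []).foldl (pvRecurseA t (F0 + 1)) (PySem.Set.add d x) := by
        -- lift the inner fold fuel from F0 to F0+1 (both sufficient)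
          have key : ∀ (l : List String), (∀ y ∈ l, y ∈ pvUniv r t) →
              ∀ (v : PySem.Set String), pvCnt r t v ≤ pvCnt r t (PySem.Set.add d x) →
              l.foldl (pvRecurseA t F0) v = l.foldl (pvRecurseA t (F0 + 1)) v := by
            intro l
            induction l with
            | nil => intros; rfl
            | cons y ys ihl =>
              intro hl v hv
              have h1 : pvRecurseA t F0 v y = pvRecurseA t (F0 + 1) v y :=
                pv_ins r t (pvCnt r t (PySem.Set.add d x)) F0 (F0 + 1) v y
                  (hl y List.mem_cons_self) hv (by omega) (by omega)
              rw [List.foldl_cons, List.foldl_cons, h1]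
              apply ihl (fun z hz => hl z (List.mem_cons_of_mem _ hz))
              obtain ⟨e, he⟩ := pv_rec_grow t (F0 + 1) v y
              have : pvCnt r t (pvRecurseA t (F0 + 1) v y) ≤ pvCnt r t v :=
                pv_cnt_mono r t v _ (fun z hz => by rw [he]; exact List.mem_append_left _ hz)
              omega
          exact key _ (fun y hy => List.mem_cons_of_mem _ (pv_child_mem t x y hy)) _ (le_refl _)
        rw [hlift, ← List.foldl_append]
        apply ih
        · intro y hy
          rcases List.mem_append.1 hy with hy | hy
          · exact List.mem_cons_of_mem _ (pv_child_mem t x y hy)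
          · exact hs y (List.mem_cons_of_mem _ hy)
        · simp only [List.length_append, List.length_cons] at hg ⊢
          have h2 : pvCnt r t (PySem.Set.add d x) + 1 ≤ pvCnt r t d := by omega
          have h3 := Nat.mul_le_mul_right (pvNumRefs t + 1) h2
          have h4 : (pvCnt r t (PySem.Set.add d x) + 1) * (pvNumRefs t + 1)
              = pvCnt r t (PySem.Set.add d x) * (pvNumRefs t + 1) + (pvNumRefs t + 1) := by ring
          omega
        · omega

lemma pv_final (r : String) (t : List (String × List String)) :
    find_subclasses r t = find_subclasses_alt r t := by
  show PySem.Set.discard (pvRecurseA t (pvNumRefs t + 2) PySem.Set.empty r) r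
      = PySem.Set.discard (PySem.Set.ofList
          (pvWorklist t ((pvNumRefs t + 2) * (pvNumRefs t + 2)) [r] [])) r
  congr 1
  rw [pv_worklist_dfs,
    PySem.Set.ofList_eq_self_of_nodup _ (pv_dfs_nodup t _ [r] [] List.nodup_nil)]
  have hcnt := pv_cnt_le r t ([] : PySem.Set String)
  rw [pv_dfs_foldl r t _ [r] (fun y hy => by
        rw [List.mem_singleton] at hy; subst hy; exact List.mem_cons_self)
      ([] : PySem.Set String) (pvNumRefs t + 2) ?_ (by omega)]
  · rfl
  · have h1 := Nat.mul_le_mul_right (pvNumRefs t + 1) hcnt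
    have h2 : (pvNumRefs t + 2) * (pvNumRefs t + 2)
        = (pvNumRefs t + 1) * (pvNumRefs t + 1) + 2 * pvNumRefs t + 3 := by ring
    simp only [List.length_singleton]
    omega

-- ===== VERDICT (by name: the statement is the Claim_ definition above) =====
theorem find_subclasses_spec : Claim_equal_find_subclasses := by
  intro root_class inheritance_tree _
  unfold Spec_find_subclasses
  exact pv_final root_class inheritance_tree
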